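-- pv_equiv track=rewrite | github.com/vivekmelekote-del/python_vivek | Day_8_Python/calculate_expected.py | calculate_expected_score
-- ===== SOURCE A (Python) =====
-- def find_letters(name, letter):
--     count = 0
--     for letter_in_name in name:
--         if(letter == letter_in_name):
--             count += 1
--     return count
--
-- def calculate_expected_score(name1, name2):
--     """Calculate expected love score manually"""
--     letters = ['t', 'r', 'u', 'e', 'l', 'o', 'v', 'e']
--     count = [0] * 8
--
--     # Count letters in both names
--     for name in [name1, name2]:
--         for i, letter in enumerate(letters):
--             count[i] += find_letters(name, letter)
--
--     # Calculate score
--     first_half = sum(count[0:4])  # t + r + u + e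
--     second_half = sum(count[4:8])  # l + o + v + e
--     score = first_half * 10 + second_half
--
--     return count, first_half, second_half, score
-- ===== SOURCE B (Python) =====
-- def calculate_expected_score(name1, name2):
--     """Calculate expected love score manually"""
--     positions = {'t': [0], 'r': [1], 'u': [2], 'e': [3, 7], 'l': [4], 'o': [5], 'v': [6]}
--     count = [0] * 8
--     first_half = 0
--     second_half = 0
--     for ch in name1 + name2:
--         for i in positions.get(ch, []):
--             count[i] += 1
--             if i < 4:
--                 first_half += 1
--             else:
--                 second_half += 1
--     score = first_half * 10 + second_half
--     return count, first_half, second_half, score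
-- ===== Notes on version B (the rewrite author's own statement) =====
-- stated objective: alternative
-- what changed: Replaces A's sixteen gather scans (one full pass over a name per letter) with an inverted index char->count-slots and a single scatter pass over the characters that also maintains the two half-sums incrementally, eliminating the final slice-and-sum stage.
import Mathlib
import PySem

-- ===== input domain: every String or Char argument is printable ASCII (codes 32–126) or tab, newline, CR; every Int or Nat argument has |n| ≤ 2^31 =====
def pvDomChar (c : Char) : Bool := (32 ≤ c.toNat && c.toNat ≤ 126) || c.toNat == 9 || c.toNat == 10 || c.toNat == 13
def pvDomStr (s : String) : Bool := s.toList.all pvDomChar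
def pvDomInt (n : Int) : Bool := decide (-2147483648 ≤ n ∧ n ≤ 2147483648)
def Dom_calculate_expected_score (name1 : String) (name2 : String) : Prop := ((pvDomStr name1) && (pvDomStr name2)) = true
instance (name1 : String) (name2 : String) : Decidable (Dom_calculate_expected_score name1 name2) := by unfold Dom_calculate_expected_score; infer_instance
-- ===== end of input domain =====

-- B replaces A's sixteen gather scans (one per letter per name) by an inverted index
-- char → count-slots and ONE scatter pass over the characters that also maintains the
-- two half-sums incrementally, so no slicing/summing remains at the end.

-- ===== PORT A =====
def find_letters (name : String) (letter : Char) : Int :=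
  name.toList.foldl (fun count letter_in_name =>
    if letter == letter_in_name then count + 1 else count) 0

def calculate_expected_score (name1 : String) (name2 : String) : List Int × Int × Int × Int :=
  let letters : List Char := ['t', 'r', 'u', 'e', 'l', 'o', 'v', 'e']
  let count : List Int := List.replicate 8 0
  let count := [name1, name2].foldl (fun count name =>
    (PySem.List.enumerate letters 0).foldl (fun count p =>
      count.set p.1.toNat (count.getD p.1.toNat 0 + find_letters name p.2)) count) count
  let first_half := (PySem.List.slice count (some 0) (some 4)).sum
  let second_half := (PySem.List.slice count (some 4) (some 8)).sum
  let score := first_half * 10 + second_half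
  (count, first_half, second_half, score)

-- ===== PORT B =====
def pvPositions : PySem.Dict Char (List Nat) :=
  PySem.Dict.ofList [('t', [0]), ('r', [1]), ('u', [2]), ('e', [3, 7]),
                     ('l', [4]), ('o', [5]), ('v', [6])]

def pvStep (st : List Int × Int × Int) (ch : Char) : List Int × Int × Int :=
  (pvPositions.getD ch []).foldl
    (fun (st : List Int × Int × Int) i =>
      let count := st.1.set i (st.1.getD i 0 + 1)
      if i < 4 then (count, st.2.1 + 1, st.2.2) else (count, st.2.1, st.2.2 + 1))
    st

def calculate_expected_score_alt (name1 : String) (name2 : String) : List Int × Int × Int × Int :=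
  let st := (name1 ++ name2).toList.foldl pvStep (List.replicate 8 0, 0, 0)
  let score := st.2.1 * 10 + st.2.2
  (st.1, st.2.1, st.2.2, score)

-- ===== PRECONDITION & SPEC =====
def Spec_calculate_expected_score (name1 : String) (name2 : String) (out : List Int × Int × Int × Int) : Prop := out = calculate_expected_score_alt name1 name2
instance (name1 : String) (name2 : String) (out : List Int × Int × Int × Int) : Decidable (Spec_calculate_expected_score name1 name2 out) := by unfold Spec_calculate_expected_score; infer_instance

-- ===== CLAIM (what is proved, stated in full; the proofs are below) =====
def Claim_equal_calculate_expected_score : Prop := ∀ (name1 : String) (name2 : String), Dom_calculate_expected_score name1 name2 → Spec_calculate_expected_score name1 name2 (calculate_expected_score name1 name2)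

-- ===== LEMMAS AND PROOFS =====

theorem find_letters_foldl (letter : Char) (l : List Char) (n : Int) :
    l.foldl (fun count c => if letter = c then count + 1 else count) n
      = n + l.count letter := by
  induction l generalizing n with
  | nil => simp
  | cons x xs ih =>
    rw [List.foldl_cons]
    by_cases h : letter = x
    · rw [if_pos h, ih]; subst h; simp; omega
    · rw [if_neg h, ih]; simp [Ne.symm h]

theorem find_letters_eq (name : String) (letter : Char) :
    find_letters name letter = (name.toList.count letter : Int) := by
  unfold find_letters
  simp only [beq_iff_eq]
  rw [find_letters_foldl]
  simp

-- the single scatter pass of B, characterised on an arbitrary start state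
theorem pvGetD_t : pvPositions.getD 't' [] = [0] := by decide
theorem pvGetD_r : pvPositions.getD 'r' [] = [1] := by decide
theorem pvGetD_u : pvPositions.getD 'u' [] = [2] := by decide
theorem pvGetD_e : pvPositions.getD 'e' [] = [3, 7] := by decide
theorem pvGetD_l : pvPositions.getD 'l' [] = [4] := by decide
theorem pvGetD_o : pvPositions.getD 'o' [] = [5] := by decide
theorem pvGetD_v : pvPositions.getD 'v' [] = [6] := by decide
theorem pvGetD_default (c : Char) (n0 : ¬c = 't') (n1 : ¬c = 'r') (n2 : ¬c = 'u')
    (n3 : ¬c = 'e') (n4 : ¬c = 'l') (n5 : ¬c = 'o') (n6 : ¬c = 'v') :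
    pvPositions.getD c [] = [] := by
  rw [PySem.Dict.getD_of_not_contains]
  rw [PySem.Dict.contains_eq_decide_mem_keys,
    show pvPositions.keys = ['t', 'r', 'u', 'e', 'l', 'o', 'v'] from by decide]
  simp [n0, n1, n2, n3, n4, n5, n6]

theorem alt_fold (l : List Char) (a0 a1 a2 a3 a4 a5 a6 a7 f s : Int) :
    l.foldl pvStep ([a0, a1, a2, a3, a4, a5, a6, a7], f, s)
    = ([a0 + l.count 't', a1 + l.count 'r', a2 + l.count 'u', a3 + l.count 'e',
        a4 + l.count 'l', a5 + l.count 'o', a6 + l.count 'v', a7 + l.count 'e'],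
       f + (l.count 't' + l.count 'r' + l.count 'u' + l.count 'e'),
       s + (l.count 'l' + l.count 'o' + l.count 'v' + l.count 'e')) := by
  induction l generalizing a0 a1 a2 a3 a4 a5 a6 a7 f s with
  | nil => simp
  | cons ch t ih =>
    rw [List.foldl_cons]
    by_cases h0 : ch = 't'
    · subst h0
      rw [show pvStep ([a0, a1, a2, a3, a4, a5, a6, a7], f, s) 't' = ([a0 + 1, a1, a2, a3, a4, a5, a6, a7], f + 1, s) from by
          simp only [pvStep]
          rw [pvGetD_t]
          norm_num]
      rw [ih]
      simp only [List.count_cons, Prod.mk.injEq, List.cons.injEq]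
      norm_num
      omega
    by_cases h1 : ch = 'r'
    · subst h1
      rw [show pvStep ([a0, a1, a2, a3, a4, a5, a6, a7], f, s) 'r' = ([a0, a1 + 1, a2, a3, a4, a5, a6, a7], f + 1, s) from by
          simp only [pvStep]
          rw [pvGetD_r]
          norm_num]
      rw [ih]
      simp only [List.count_cons, Prod.mk.injEq, List.cons.injEq]
      norm_num
      omega
    by_cases h2 : ch = 'u'
    · subst h2
      rw [show pvStep ([a0, a1, a2, a3, a4, a5, a6, a7], f, s) 'u' = ([a0, a1, a2 + 1, a3, a4, a5, a6, a7], f + 1, s) from by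
          simp only [pvStep]
          rw [pvGetD_u]
          norm_num]
      rw [ih]
      simp only [List.count_cons, Prod.mk.injEq, List.cons.injEq]
      norm_num
      omega
    by_cases h3 : ch = 'e'
    · subst h3
      rw [show pvStep ([a0, a1, a2, a3, a4, a5, a6, a7], f, s) 'e' = ([a0, a1, a2, a3 + 1, a4, a5, a6, a7 + 1], f + 1, s + 1) from by
          simp only [pvStep]
          rw [pvGetD_e]
          norm_num]
      rw [ih]
      simp only [List.count_cons, Prod.mk.injEq, List.cons.injEq]
      norm_num
      omega
    by_cases h4 : ch = 'l'
    · subst h4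
      rw [show pvStep ([a0, a1, a2, a3, a4, a5, a6, a7], f, s) 'l' = ([a0, a1, a2, a3, a4 + 1, a5, a6, a7], f, s + 1) from by
          simp only [pvStep]
          rw [pvGetD_l]
          norm_num]
      rw [ih]
      simp only [List.count_cons, Prod.mk.injEq, List.cons.injEq]
      norm_num
      omega
    by_cases h5 : ch = 'o'
    · subst h5
      rw [show pvStep ([a0, a1, a2, a3, a4, a5, a6, a7], f, s) 'o' = ([a0, a1, a2, a3, a4, a5 + 1, a6, a7], f, s + 1) from by
          simp only [pvStep]
          rw [pvGetD_o]
          norm_num]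
      rw [ih]
      simp only [List.count_cons, Prod.mk.injEq, List.cons.injEq]
      norm_num
      omega
    by_cases h6 : ch = 'v'
    · subst h6
      rw [show pvStep ([a0, a1, a2, a3, a4, a5, a6, a7], f, s) 'v' = ([a0, a1, a2, a3, a4, a5, a6 + 1, a7], f, s + 1) from by
          simp only [pvStep]
          rw [pvGetD_v]
          norm_num]
      rw [ih]
      simp only [List.count_cons, Prod.mk.injEq, List.cons.injEq]
      norm_num
      omega
    · rw [show pvStep ([a0, a1, a2, a3, a4, a5, a6, a7], f, s) ch
            = ([a0, a1, a2, a3, a4, a5, a6, a7], f, s) from by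
          simp only [pvStep]
          rw [pvGetD_default ch h0 h1 h2 h3 h4 h5 h6]
          simp]
      rw [ih]
      simp only [List.count_cons, Prod.mk.injEq, List.cons.injEq]
      norm_num [h0, h1, h2, h3, h4, h5, h6]

set_option maxHeartbeats 1000000 in
theorem calculate_expected_score_spec' (name1 name2 : String) :
    calculate_expected_score name1 name2 = calculate_expected_score_alt name1 name2 := by
  unfold calculate_expected_score calculate_expected_score_alt
  rw [show (List.replicate 8 (0 : Int), (0 : Int), (0 : Int))
        = (([0, 0, 0, 0, 0, 0, 0, 0] : List Int), (0 : Int), (0 : Int)) from rfl,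
    String.toList_append, alt_fold]
  simp [PySem.List.enumerate, find_letters_eq, PySem.List.slice, PySem.List.clampIdx,
    List.count_append, Prod.mk.injEq]
  refine ⟨?_, ?_, ?_⟩ <;> ring

-- ===== VERDICT (by name: the statement is the Claim_ definition above) =====
theorem calculate_expected_score_spec : Claim_equal_calculate_expected_score := by
  intro name1 name2 _
  exact calculate_expected_score_spec' name1 name2
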